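-- pv_equiv track=rewrite | github.com/jo999999/_study_coding_test | 하늘/python/LV1/PRO_82612_부족한 금액 계산하기.py | solution
-- ===== SOURCE A (Python) =====
-- def solution(price, money, count):
--     answer = 0
--     add =  0
--     for _ in range(count):
--
--         add +=1
--         answer += price * (add)
--
--     result = answer - money
--
--     if  result < 0 :
--         return 0
--     else :
--         return result
-- ===== SOURCE B (Python) =====
-- def solution(price, money, count):
--     n = count if count > 0 else 0
--     lack = price * n * (n + 1) // 2 - money
--     return lack if lack > 0 else 0
-- ===== Notes on version B (the rewrite author's own statement) =====
-- stated objective: faster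
-- what changed: Replaces the O(count) accumulation loop by the closed-form arithmetic-series formula price*count*(count+1)//2, clamped at 0.
import Mathlib
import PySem

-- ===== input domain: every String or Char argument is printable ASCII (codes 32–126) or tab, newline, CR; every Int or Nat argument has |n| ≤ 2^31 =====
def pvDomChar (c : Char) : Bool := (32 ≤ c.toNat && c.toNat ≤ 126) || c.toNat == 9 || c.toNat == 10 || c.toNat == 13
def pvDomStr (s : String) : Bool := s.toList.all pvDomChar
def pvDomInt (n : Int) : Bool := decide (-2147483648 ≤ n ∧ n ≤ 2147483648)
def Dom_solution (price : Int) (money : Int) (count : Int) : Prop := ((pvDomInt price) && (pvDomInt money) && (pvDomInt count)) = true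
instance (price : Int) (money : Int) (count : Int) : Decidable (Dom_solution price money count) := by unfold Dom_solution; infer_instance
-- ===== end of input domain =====

-- B replaces A's O(count) accumulation loop by the closed-form arithmetic-series formula, clamped at 0.

-- ===== PORT A =====
-- literal transliteration: answer/add accumulated over 'for _ in range(count)'
def solution (price : Int) (money : Int) (count : Int) : Int :=
  let st := (PySem.List.pyRange 0 count 1).foldl
    (fun (st : Int × Int) _ => (st.1 + price * (st.2 + 1), st.2 + 1)) (0, 0)
  let result := st.1 - money
  if result < 0 then 0 else result

-- ===== PORT B =====
def solution_alt (price : Int) (money : Int) (count : Int) : Int :=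
  let n : Int := if count > 0 then count else 0
  let lack := PySem.Int.floordiv (price * n * (n + 1)) 2 - money
  if lack > 0 then lack else 0

-- ===== PRECONDITION & SPEC =====
def Spec_solution (price : Int) (money : Int) (count : Int) (out : Int) : Prop := out = solution_alt price money count
instance (price : Int) (money : Int) (count : Int) (out : Int) : Decidable (Spec_solution price money count out) := by unfold Spec_solution; infer_instance

-- ===== CLAIM (what is proved, stated in full; the proofs are below) =====
def Claim_equal_solution : Prop := ∀ (price : Int) (money : Int) (count : Int), Dom_solution price money count → Spec_solution price money count (solution price money count)

-- ===== LEMMAS AND PROOFS =====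

-- loop invariant of A's fold: the counter, and twice the accumulated answer
theorem pv_fold_inv (price : Int) (l : List Int) (a m : Int) :
    ((l.foldl (fun (st : Int × Int) _ => (st.1 + price * (st.2 + 1), st.2 + 1)) (a, m)).2
        = m + (l.length : Int)) ∧
    (2 * (l.foldl (fun (st : Int × Int) _ => (st.1 + price * (st.2 + 1), st.2 + 1)) (a, m)).1
        = 2 * a + price * (2 * (l.length : Int) * m + (l.length : Int) * ((l.length : Int) + 1))) := by
  induction l generalizing a m with
  | nil => simp
  | cons x l ih =>
    simp only [List.foldl_cons, List.length_cons]
    obtain ⟨h2, h1⟩ := ih (a + price * (m + 1)) (m + 1)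
    constructor
    · rw [h2]; push_cast; ring
    · rw [h1]; push_cast; ring

-- ===== VERDICT (by name: the statement is the Claim_ definition above) =====
theorem solution_spec : Claim_equal_solution := by
  intro price money count _
  unfold Spec_solution solution solution_alt
  have hlen : ((PySem.List.pyRange 0 count 1).length : Int) = if count > 0 then count else 0 := by
    rw [PySem.List.length_pyRange_one]
    split_ifs with h <;> omega
  obtain ⟨_, h1⟩ := pv_fold_inv price (PySem.List.pyRange 0 count 1) 0 0
  rw [hlen] at h1
  set n : Int := if count > 0 then count else 0 with hn
  set s := ((PySem.List.pyRange 0 count 1).foldl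
      (fun (st : Int × Int) _ => (st.1 + price * (st.2 + 1), st.2 + 1)) (0, 0)).1 with hs
  have hfd : PySem.Int.floordiv (price * n * (n + 1)) 2 = s := by
    rw [PySem.Int.floordiv_eq_ediv_of_pos (by omega)]
    have hc : price * (2 * n * 0 + n * (n + 1)) = price * n * (n + 1) := by ring
    rw [hc] at h1
    omega
  simp only [hfd]
  split_ifs <;> omega
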